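-- pv_equiv track=rewrite | github.com/openstack-archive/tripleo-ansible | tripleo_ansible/ansible_plugins/modules/ceph_spec_bootstrap.py | get_label_map
-- ===== SOURCE A (Python) =====
-- SERVICE_MAP = {
--     'CephMon': ['mon'],
--     'CephMgr': ['mgr'],
--     'CephOSD': ['osd']
-- }
--
-- def get_label_map(hosts_to_ips, roles_to_svcs, roles_to_hosts, ceph_service_types):
--     """Return a map of hostname to list of ceph service to run on that host, e.g.
--          label_map['oc0-ceph-0'] = ['osd']
--          label_map['oc0-controller-0'] = ['mon', 'mgr', '_admin']
--     """
--     label_map = {}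
--     for host in hosts_to_ips:
--         label_map[host] = []
--         for role, host_list in roles_to_hosts.items():
--             if host in host_list:
--                 for tripleo_svc in roles_to_svcs[role]:
--                     for potential_ceph_svc in SERVICE_MAP[tripleo_svc]:
--                         if potential_ceph_svc in ceph_service_types:
--                             label_map[host].append(potential_ceph_svc)
--                         if potential_ceph_svc == 'mon':
--                             label_map[host].append('_admin')
--     return label_map
-- ===== SOURCE B (Python) =====
-- SERVICE_MAP = {
--     'CephMon': ['mon'],
--     'CephMgr': ['mgr'],
--     'CephOSD': ['osd']
-- }
--
-- def get_label_map(hosts_to_ips, roles_to_svcs, roles_to_hosts, ceph_service_types):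
--     """Invert roles_to_hosts once: for each role compute its ceph labels a single
--     time and append them to every host of that role, instead of scanning every
--     role's host list for every host."""
--     ceph_set = set(ceph_service_types)
--     host_roles = {h: [] for h in hosts_to_ips}
--     for role, host_list in roles_to_hosts.items():
--         hs = [h for h in dict.fromkeys(host_list) if h in host_roles]
--         if hs:
--             labels = []
--             for svc in roles_to_svcs[role]:
--                 for ceph_svc in SERVICE_MAP[svc]:
--                     if ceph_svc in ceph_set:
--                         labels.append(ceph_svc)
--                     if ceph_svc == 'mon':
--                         labels.append('_admin')
--             for h in hs:
--                 host_roles[h].append(labels)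
--     return {h: [l for ls in rs for l in ls] for h, rs in host_roles.items()}
-- ===== Notes on version B (the rewrite author's own statement) =====
-- stated objective: faster
-- what changed: Instead of scanning every role's host list once per host (hosts x roles x hostlist), B makes one pass over roles_to_hosts, computes each role's ceph labels once, and appends that label list to each of the role's hosts via an inverted host->label-lists dict, flattening at the end.
import Mathlib
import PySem

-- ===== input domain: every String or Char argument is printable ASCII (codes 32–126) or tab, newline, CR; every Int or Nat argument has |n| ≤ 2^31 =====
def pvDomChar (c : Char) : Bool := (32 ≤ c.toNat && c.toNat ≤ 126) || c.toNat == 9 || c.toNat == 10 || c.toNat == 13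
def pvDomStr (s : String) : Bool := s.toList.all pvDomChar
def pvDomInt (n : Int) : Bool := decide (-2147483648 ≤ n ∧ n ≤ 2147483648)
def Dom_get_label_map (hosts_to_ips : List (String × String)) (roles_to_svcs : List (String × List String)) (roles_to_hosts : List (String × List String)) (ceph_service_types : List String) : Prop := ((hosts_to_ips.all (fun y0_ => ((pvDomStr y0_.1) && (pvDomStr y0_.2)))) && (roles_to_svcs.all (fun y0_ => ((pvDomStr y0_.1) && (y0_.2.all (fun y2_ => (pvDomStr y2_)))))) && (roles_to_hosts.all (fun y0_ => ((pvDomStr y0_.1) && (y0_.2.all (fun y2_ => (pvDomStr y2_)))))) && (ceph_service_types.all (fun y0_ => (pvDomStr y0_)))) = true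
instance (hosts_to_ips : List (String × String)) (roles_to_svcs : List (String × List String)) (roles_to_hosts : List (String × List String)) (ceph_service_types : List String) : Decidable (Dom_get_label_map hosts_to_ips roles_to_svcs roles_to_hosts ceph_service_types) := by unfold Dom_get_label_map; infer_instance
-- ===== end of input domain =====

-- B inverts roles_to_hosts in one pass (each role's labels computed once, appended to all of the
-- role's hosts) instead of A's per-host scan of every role's host list; equal on Pre_ (no KeyError).

-- the module-level SERVICE_MAP dict, looked up by key (none = KeyError)
def serviceMap (s : String) : Option (List String) :=
  if s = "CephMon" then some ["mon"]
  else if s = "CephMgr" then some ["mgr"]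
  else if s = "CephOSD" then some ["osd"]
  else none

-- ===== PORT A =====
-- Each Python loop body is a named step function; dict lookups that raise KeyError in Python are
-- ported with `.getD []` — Pre_ excludes exactly the inputs on which such a lookup is reached.

-- body of `for potential_ceph_svc in SERVICE_MAP[tripleo_svc]:`
def stepA3 (ceph_service_types : List String) (host : String)
    (lm : PySem.Dict String (List String)) (ceph_svc : String) : PySem.Dict String (List String) :=
  let lm' := if ceph_service_types.contains ceph_svc then lm.modify host [] (· ++ [ceph_svc]) else lm
  if ceph_svc == "mon" then lm'.modify host [] (· ++ ["_admin"]) else lm'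

-- body of `for tripleo_svc in roles_to_svcs[role]:`
def stepA2 (ceph_service_types : List String) (host : String)
    (lm : PySem.Dict String (List String)) (tripleo_svc : String) : PySem.Dict String (List String) :=
  ((serviceMap tripleo_svc).getD []).foldl (stepA3 ceph_service_types host) lm

-- body of `for role, host_list in roles_to_hosts.items():`
def stepA1 (sd : PySem.Dict String (List String)) (ceph_service_types : List String) (host : String)
    (lm : PySem.Dict String (List String)) (rh : String × List String) : PySem.Dict String (List String) :=
  if rh.2.contains host then
    ((sd.get? rh.1).getD []).foldl (stepA2 ceph_service_types host) lm
  else lm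

def get_label_map (hosts_to_ips : List (String × String)) (roles_to_svcs : List (String × List String)) (roles_to_hosts : List (String × List String)) (ceph_service_types : List String) : List (String × List String) :=
  let hd := PySem.Dict.ofList hosts_to_ips
  let sd := PySem.Dict.ofList roles_to_svcs
  let rd := PySem.Dict.ofList roles_to_hosts
  (hd.keys.foldl
    (fun lm host => rd.items.foldl (stepA1 sd ceph_service_types host) (lm.insert host []))
    PySem.Dict.empty).items

-- ===== PORT B =====

-- body of the two inner label loops of B
def stepB3 (cephSet : PySem.Set String) (labels : List String) (ceph_svc : String) : List String :=
  let labels' := if cephSet.contains ceph_svc then labels ++ [ceph_svc] else labels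
  if ceph_svc == "mon" then labels' ++ ["_admin"] else labels'

-- B's `labels` computed once per role
def labelsB (sd : PySem.Dict String (List String)) (cephSet : PySem.Set String) (role : String) : List String :=
  ((sd.get? role).getD []).foldl
    (fun labels svc => ((serviceMap svc).getD []).foldl (stepB3 cephSet) labels) []

-- body of `for role, host_list in roles_to_hosts.items():`
def stepB1 (sd : PySem.Dict String (List String)) (cephSet : PySem.Set String)
    (hr : PySem.Dict String (List (List String))) (rh : String × List String) :
    PySem.Dict String (List (List String)) :=
  let hs := (PySem.List.dedup rh.2).filter (fun h => hr.contains h)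
  if hs.isEmpty then hr
  else
    let labels := labelsB sd cephSet rh.1
    hs.foldl (fun hr h => hr.modify h [] (· ++ [labels])) hr

def get_label_map_alt (hosts_to_ips : List (String × String)) (roles_to_svcs : List (String × List String)) (roles_to_hosts : List (String × List String)) (ceph_service_types : List String) : List (String × List String) :=
  let hd := PySem.Dict.ofList hosts_to_ips
  let sd := PySem.Dict.ofList roles_to_svcs
  let rd := PySem.Dict.ofList roles_to_hosts
  let cephSet := PySem.Set.ofList ceph_service_types
  let hostRoles0 : PySem.Dict String (List (List String)) :=
    hd.keys.foldl (fun d h => d.insert h []) PySem.Dict.empty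
  let hostRoles := rd.items.foldl (stepB1 sd cephSet) hostRoles0
  hostRoles.items.map (fun p => (p.1, p.2.flatten))

-- ===== PRECONDITION & SPEC =====
-- Pre_ excludes exactly the inputs where Python A raises KeyError: a role whose host list
-- contains some host of hosts_to_ips but is missing from roles_to_svcs, or maps to a
-- tripleo service that is not a key of SERVICE_MAP.
def Pre_get_label_map (hosts_to_ips : List (String × String)) (roles_to_svcs : List (String × List String)) (roles_to_hosts : List (String × List String)) (ceph_service_types : List String) : Prop :=
  ((PySem.Dict.ofList roles_to_hosts).items.all (fun rh =>
      !(hosts_to_ips.any (fun p => rh.2.contains p.1)) ||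
      (match (PySem.Dict.ofList roles_to_svcs).get? rh.1 with
       | some svcs => svcs.all (fun s => s == "CephMon" || s == "CephMgr" || s == "CephOSD")
       | none => false))) = true
instance (hosts_to_ips : List (String × String)) (roles_to_svcs : List (String × List String)) (roles_to_hosts : List (String × List String)) (ceph_service_types : List String) : Decidable (Pre_get_label_map hosts_to_ips roles_to_svcs roles_to_hosts ceph_service_types) := by unfold Pre_get_label_map; infer_instance

def pvWitness_get_label_map : (List (String × String)) × (List (String × List String)) × (List (String × List String)) × List String :=
  ([("oc0-ceph-0", "192.168.24.11"), ("oc0-controller-0", "192.168.24.23")],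
   [("CephStorage", ["CephOSD"]), ("Controller", ["CephMon", "CephMgr"])],
   [("CephStorage", ["oc0-ceph-0"]), ("Controller", ["oc0-controller-0"])],
   ["mon", "mgr", "osd"])

def Spec_get_label_map (hosts_to_ips : List (String × String)) (roles_to_svcs : List (String × List String)) (roles_to_hosts : List (String × List String)) (ceph_service_types : List String) (out : List (String × List String)) : Prop := out = get_label_map_alt hosts_to_ips roles_to_svcs roles_to_hosts ceph_service_types
instance (hosts_to_ips : List (String × String)) (roles_to_svcs : List (String × List String)) (roles_to_hosts : List (String × List String)) (ceph_service_types : List String) (out : List (String × List String)) : Decidable (Spec_get_label_map hosts_to_ips roles_to_svcs roles_to_hosts ceph_service_types out) := by unfold Spec_get_label_map; infer_instance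

-- ===== CLAIM (what is proved, stated in full; the proofs are below) =====
def Claim_equal_get_label_map : Prop := ∀ (hosts_to_ips : List (String × String)) (roles_to_svcs : List (String × List String)) (roles_to_hosts : List (String × List String)) (ceph_service_types : List String), Dom_get_label_map hosts_to_ips roles_to_svcs roles_to_hosts ceph_service_types → Pre_get_label_map hosts_to_ips roles_to_svcs roles_to_hosts ceph_service_types → Spec_get_label_map hosts_to_ips roles_to_svcs roles_to_hosts ceph_service_types (get_label_map hosts_to_ips roles_to_svcs roles_to_hosts ceph_service_types)

-- ===== LEMMAS AND PROOFS =====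

-- what one innermost iteration appends for ceph service c
def wFn (cs : List String) (c : String) : List String :=
  (if cs.contains c then [c] else []) ++ (if c == "mon" then ["_admin"] else [])

-- labels contributed by one role
def labelsFlat (sd : PySem.Dict String (List String)) (cs : List String) (r : String) : List String :=
  ((sd.get? r).getD []).flatMap (fun svc => ((serviceMap svc).getD []).flatMap (wFn cs))

lemma contains_ofList (cs : List String) (c : String) :
    (PySem.Set.ofList cs).contains c = cs.contains c := by
  by_cases h : c ∈ cs <;> simp [PySem.Set.mem_ofList, h]

lemma keys_modify_contained {ν : Type} (d : PySem.Dict String ν) (k : String) (d0 : ν) (f : ν → ν)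
    (h : d.contains k = true) : (d.modify k d0 f).keys = d.keys := by
  rw [PySem.Dict.keys_modify, PySem.Dict.keys_insert_of_contains _ _ h]

lemma keys_insert_eq_add {ν : Type} (d : PySem.Dict String ν) (h : String) (v : ν) :
    (d.insert h v).keys = PySem.Set.add d.keys h := by
  by_cases hc : d.contains h = true
  · rw [PySem.Dict.keys_insert_of_contains _ _ hc, PySem.Set.add]
    rw [PySem.Dict.contains_eq_decide_mem_keys] at hc
    simp at hc
    simp [hc]
  · rw [PySem.Dict.keys_insert_of_not_contains _ _ (by simpa using hc), PySem.Set.add]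
    rw [PySem.Dict.contains_eq_decide_mem_keys] at hc
    simp at hc
    simp [hc]

-- a fold whose step preserves keys (given the pivot key is present) preserves keys
lemma fold_keys_pres {α ν : Type} (l : List α) (f : PySem.Dict String ν → α → PySem.Dict String ν)
    (host : String) (hstep : ∀ d x, d.contains host = true → (f d x).keys = d.keys) :
    ∀ d : PySem.Dict String ν, d.contains host = true → (l.foldl f d).keys = d.keys := by
  induction l with
  | nil => intro d _; rfl
  | cons a t ih =>
      intro d hd
      have hk := hstep d a hd
      have hc : (f d a).contains host = true := by
        rw [PySem.Dict.contains_eq_decide_mem_keys, hk, ← PySem.Dict.contains_eq_decide_mem_keys]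
        exact hd
      simp only [List.foldl_cons]
      rw [ih _ hc, hk]

-- ---- A side: getD through the nested folds ----
lemma stepA3_fold_getD (cs : List String) (host k : String) (l : List String)
    (lm : PySem.Dict String (List String)) :
    (l.foldl (stepA3 cs host) lm).getD k []
      = if k = host then lm.getD k [] ++ l.flatMap (wFn cs) else lm.getD k [] := by
  induction l generalizing lm with
  | nil => simp
  | cons c t ih =>
      simp only [List.foldl_cons, List.flatMap_cons, ih]
      have hstep : (stepA3 cs host lm c).getD k []
          = if k = host then lm.getD k [] ++ wFn cs c else lm.getD k [] := by
        simp only [stepA3, wFn]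
        split_ifs <;> simp_all [PySem.Dict.getD_modify]
      rw [hstep]; split_ifs <;> simp

lemma stepA2_fold_getD (cs : List String) (host k : String) (l : List String)
    (lm : PySem.Dict String (List String)) :
    (l.foldl (stepA2 cs host) lm).getD k []
      = if k = host then
          lm.getD k [] ++ l.flatMap (fun svc => ((serviceMap svc).getD []).flatMap (wFn cs))
        else lm.getD k [] := by
  induction l generalizing lm with
  | nil => simp
  | cons c t ih =>
      simp only [List.foldl_cons, List.flatMap_cons, ih, stepA2, stepA3_fold_getD]
      split_ifs <;> simp

lemma stepA1_fold_getD (sd : PySem.Dict String (List String)) (cs : List String) (host k : String)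
    (items : List (String × List String)) (lm : PySem.Dict String (List String)) :
    (items.foldl (stepA1 sd cs host) lm).getD k []
      = if k = host then
          lm.getD k [] ++ items.flatMap (fun rh => if rh.2.contains host then labelsFlat sd cs rh.1 else [])
        else lm.getD k [] := by
  induction items generalizing lm with
  | nil => simp
  | cons rh t ih =>
      simp only [List.foldl_cons, List.flatMap_cons, ih, stepA1]
      split_ifs with h1 h2 <;> simp_all [stepA2_fold_getD, labelsFlat]

lemma A_outer_getD (sd : PySem.Dict String (List String)) (cs : List String)
    (items : List (String × List String)) (hs : List String) (k : String)
    (lm : PySem.Dict String (List String)) :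
    (hs.foldl (fun lm host => items.foldl (stepA1 sd cs host) (lm.insert host [])) lm).getD k []
      = if k ∈ hs then
          items.flatMap (fun rh => if rh.2.contains k then labelsFlat sd cs rh.1 else [])
        else lm.getD k [] := by
  induction hs generalizing lm with
  | nil => simp
  | cons h t ih =>
      simp only [List.foldl_cons, ih, List.mem_cons]
      by_cases hk : k ∈ t
      · simp [hk]
      · by_cases he : k = h
        · subst he
          simp [hk, stepA1_fold_getD]
        · simp [hk, he, stepA1_fold_getD, PySem.Dict.getD_insert]

-- ---- A side: keys ----
lemma stepA3_keys (cs : List String) (host : String) (c : String)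
    (lm : PySem.Dict String (List String)) (h : lm.contains host = true) :
    (stepA3 cs host lm c).keys = lm.keys := by
  have hmk : ∀ (f : List String → List String), (lm.modify host [] f).keys = lm.keys :=
    fun f => keys_modify_contained lm host [] f h
  have hmc : ∀ (f : List String → List String), (lm.modify host [] f).contains host = true := by
    intro f; rw [PySem.Dict.contains_modify]; simp
  simp only [stepA3]
  split_ifs
  · rw [keys_modify_contained _ _ _ _ (hmc _), hmk]
  · rw [hmk]
  · rw [hmk]
  · rfl

lemma stepA2_keys (cs : List String) (host : String) (c : String)
    (lm : PySem.Dict String (List String)) (h : lm.contains host = true) :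
    (stepA2 cs host lm c).keys = lm.keys := by
  exact fold_keys_pres _ _ host (fun d x hd => stepA3_keys cs host x d hd) lm h

lemma stepA1_keys (sd : PySem.Dict String (List String)) (cs : List String) (host : String)
    (rh : String × List String) (lm : PySem.Dict String (List String))
    (h : lm.contains host = true) :
    (stepA1 sd cs host lm rh).keys = lm.keys := by
  simp only [stepA1]
  split_ifs
  · exact fold_keys_pres _ _ host (fun d x hd => stepA2_keys cs host x d hd) lm h
  · rfl

lemma A_outer_keys (sd : PySem.Dict String (List String)) (cs : List String)
    (items : List (String × List String)) (hs : List String)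
    (lm : PySem.Dict String (List String)) :
    (hs.foldl (fun lm host => items.foldl (stepA1 sd cs host) (lm.insert host [])) lm).keys
      = PySem.Set.update lm.keys hs := by
  induction hs generalizing lm with
  | nil => rfl
  | cons h t ih =>
      simp only [List.foldl_cons]
      rw [ih]
      have hk : (items.foldl (stepA1 sd cs h) (lm.insert h [])).keys = (lm.insert h []).keys :=
        fold_keys_pres _ _ h (fun d x hd => stepA1_keys sd cs h x d hd) _
          (PySem.Dict.contains_insert_self _ _ _)
      rw [hk, keys_insert_eq_add]
      rfl

-- ---- B side ----
lemma stepB3_fold (cs : List String) (l : List String) (acc : List String) :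
    l.foldl (stepB3 (PySem.Set.ofList cs)) acc = acc ++ l.flatMap (wFn cs) := by
  induction l generalizing acc with
  | nil => simp
  | cons c t ih =>
      simp only [List.foldl_cons, List.flatMap_cons, ih, stepB3, wFn, contains_ofList]
      split_ifs <;> simp

lemma labelsB_eq (sd : PySem.Dict String (List String)) (cs : List String) (r : String) :
    labelsB sd (PySem.Set.ofList cs) r = labelsFlat sd cs r := by
  simp only [labelsB, labelsFlat]
  generalize (sd.get? r).getD [] = l
  suffices h : ∀ acc : List String,
      l.foldl (fun labels svc => ((serviceMap svc).getD []).foldl (stepB3 (PySem.Set.ofList cs)) labels) acc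
        = acc ++ l.flatMap (fun svc => ((serviceMap svc).getD []).flatMap (wFn cs)) by
    simpa using h []
  induction l with
  | nil => simp
  | cons c t ih =>
      intro acc
      simp only [List.foldl_cons, List.flatMap_cons]
      rw [stepB3_fold, ih, List.append_assoc]

lemma B0_getD (hs : List String) (k : String) :
    ((hs.foldl (fun d h => d.insert h ([] : List (List String))) PySem.Dict.empty)).getD k [] = [] := by
  have : ∀ d : PySem.Dict String (List (List String)), d.getD k [] = [] →
      (hs.foldl (fun d h => d.insert h []) d).getD k [] = [] := by
    induction hs with
    | nil => intro d h; simpa using h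
    | cons a t ih =>
        intro d h
        simp only [List.foldl_cons]
        exact ih _ (by rw [PySem.Dict.getD_insert]; split_ifs <;> simp [h])
  exact this _ (by simp)

lemma B0_keys (hs : List String) :
    ((hs.foldl (fun d h => d.insert h ([] : List (List String))) PySem.Dict.empty)).keys
      = PySem.Set.ofList hs := by
  have : ∀ d : PySem.Dict String (List (List String)),
      (hs.foldl (fun d h => d.insert h []) d).keys = PySem.Set.update d.keys hs := by
    induction hs with
    | nil => intro d; rfl
    | cons a t ih =>
        intro d
        simp only [List.foldl_cons]
        rw [ih, keys_insert_eq_add]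
        rfl
  rw [this]
  rfl

lemma B_hs_fold_getD (labels : List String) (hs : List String) (hnd : hs.Nodup) (k : String)
    (hr : PySem.Dict String (List (List String))) :
    (hs.foldl (fun hr h => hr.modify h [] (· ++ [labels])) hr).getD k []
      = if k ∈ hs then hr.getD k [] ++ [labels] else hr.getD k [] := by
  induction hs generalizing hr with
  | nil => simp
  | cons a t ih =>
      simp only [List.foldl_cons, List.mem_cons]
      rw [ih (by simp_all)]
      by_cases hk : k ∈ t
      · have : k ≠ a := by rintro rfl; simp_all
        simp [hk, this, PySem.Dict.getD_modify]
      · by_cases he : k = a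
        · subst he; simp [hk]
        · simp [hk, he, PySem.Dict.getD_modify]

lemma B_hs_fold_keys (labels : List String) (hs : List String)
    (hr : PySem.Dict String (List (List String)))
    (hsub : ∀ h ∈ hs, hr.contains h = true) :
    (hs.foldl (fun hr h => hr.modify h [] (· ++ [labels])) hr).keys = hr.keys := by
  induction hs generalizing hr with
  | nil => rfl
  | cons a t ih =>
      have hk := keys_modify_contained hr a [] (· ++ [labels]) (hsub a (by simp))
      simp only [List.foldl_cons]
      rw [ih _ (by
        intro h hh
        rw [PySem.Dict.contains_eq_decide_mem_keys, hk, ← PySem.Dict.contains_eq_decide_mem_keys]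
        exact hsub h (by simp [hh])), hk]

lemma stepB1_eq (sd : PySem.Dict String (List String)) (cephSet : PySem.Set String)
    (hr : PySem.Dict String (List (List String))) (rh : String × List String) :
    stepB1 sd cephSet hr rh
      = ((PySem.List.dedup rh.2).filter (fun h => hr.contains h)).foldl
          (fun hr h => hr.modify h [] (· ++ [labelsB sd cephSet rh.1])) hr := by
  simp only [stepB1]
  split_ifs with h
  · rw [List.isEmpty_iff] at h
    rw [h]
    rfl
  · rfl

lemma B_main (sd : PySem.Dict String (List String)) (cephSet : PySem.Set String)
    (items : List (String × List String)) (k : String) :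
    ∀ hr : PySem.Dict String (List (List String)),
    ((items.foldl (stepB1 sd cephSet) hr).keys = hr.keys ∧
     (items.foldl (stepB1 sd cephSet) hr).getD k []
       = hr.getD k [] ++ items.flatMap (fun rh =>
           if ((PySem.List.dedup rh.2).filter (fun h => hr.contains h)).contains k
           then [labelsB sd cephSet rh.1] else [])) := by
  induction items with
  | nil => intro hr; simp
  | cons rh t ih =>
      intro hr
      have hsub : ∀ h ∈ (PySem.List.dedup rh.2).filter (fun h => hr.contains h),
          hr.contains h = true := by
        intro h hh
        exact (List.mem_filter.mp hh).2
      have hnd : ((PySem.List.dedup rh.2).filter (fun h => hr.contains h)).Nodup :=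
        (PySem.List.nodup_dedup _).filter _
      have hk1 : (stepB1 sd cephSet hr rh).keys = hr.keys := by
        rw [stepB1_eq]; exact B_hs_fold_keys _ _ _ hsub
      have hcont : ∀ h, (stepB1 sd cephSet hr rh).contains h = hr.contains h := by
        intro h
        rw [PySem.Dict.contains_eq_decide_mem_keys, hk1, ← PySem.Dict.contains_eq_decide_mem_keys]
      obtain ⟨ihk, ihg⟩ := ih (stepB1 sd cephSet hr rh)
      constructor
      · simp only [List.foldl_cons]
        rw [ihk, hk1]
      · simp only [List.foldl_cons, List.flatMap_cons]
        rw [ihg]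
        have hg1 : (stepB1 sd cephSet hr rh).getD k []
            = hr.getD k [] ++ (if ((PySem.List.dedup rh.2).filter (fun h => hr.contains h)).contains k
                then [labelsB sd cephSet rh.1] else []) := by
          rw [stepB1_eq, B_hs_fold_getD _ _ hnd]
          simp only [List.contains_iff_mem, List.mem_filter, PySem.List.mem_dedup]
          split_ifs <;> simp
        have hpred : ∀ rh' : String × List String,
            ((PySem.List.dedup rh'.2).filter (fun h => (stepB1 sd cephSet hr rh).contains h)).contains k
              = ((PySem.List.dedup rh'.2).filter (fun h => hr.contains h)).contains k := by
          intro rh'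
          congr 1
          apply List.filter_congr
          intro x _
          exact hcont x
        simp only [hpred, hg1, List.append_assoc]

lemma flatten_flatMap_if {α : Type} (l : List α) (p : α → Bool) (g : α → List String) :
    (l.flatMap (fun x => if p x then [g x] else [])).flatten
      = l.flatMap (fun x => if p x then g x else []) := by
  induction l with
  | nil => simp
  | cons a t ih => simp only [List.flatMap_cons, List.flatten_append, ih]; split_ifs <;> simp

-- ===== VERDICT (by name: the statement is the Claim_ definition above) =====
theorem get_label_map_spec : Claim_equal_get_label_map := by
  intro hosts_to_ips roles_to_svcs roles_to_hosts cs _ _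
  unfold Spec_get_label_map get_label_map get_label_map_alt
  simp only []
  set hd := PySem.Dict.ofList hosts_to_ips with hhd
  set sd := PySem.Dict.ofList roles_to_svcs with hsd
  set rd := PySem.Dict.ofList roles_to_hosts with hrd
  have hnd : hd.keys.Nodup := PySem.Dict.nodup_keys_ofList _
  -- A side
  set dA := hd.keys.foldl (fun lm host => rd.items.foldl (stepA1 sd cs host) (lm.insert host []))
      PySem.Dict.empty with hdA
  have hAkeys : dA.keys = hd.keys := by
    rw [hdA, A_outer_keys]
    show PySem.Set.update ([] : List String) hd.keys = hd.keys
    rw [show PySem.Set.update ([] : List String) hd.keys = PySem.Set.ofList hd.keys from rfl]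
    exact PySem.Set.ofList_eq_self_of_nodup _ hnd
  -- B side
  set hr0 := hd.keys.foldl (fun d h => d.insert h ([] : List (List String))) PySem.Dict.empty
    with hhr0
  have h0keys : hr0.keys = hd.keys := by
    rw [hhr0, B0_keys]
    exact PySem.Set.ofList_eq_self_of_nodup _ hnd
  set dB := rd.items.foldl (stepB1 sd (PySem.Set.ofList cs)) hr0 with hdB
  obtain ⟨hBkeys, _⟩ := B_main sd (PySem.Set.ofList cs) rd.items "" hr0
  rw [← hdB] at hBkeys
  have hBkeys' : dB.keys = hd.keys := by rw [hBkeys, h0keys]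
  -- items of both sides as maps over hd.keys
  rw [PySem.Dict.items_eq_map_keys dA (hAkeys ▸ hnd) [],
      PySem.Dict.items_eq_map_keys dB (hBkeys' ▸ hnd) [],
      hAkeys, hBkeys', List.map_map]
  apply List.map_congr_left
  intro k hk
  have hA : dA.getD k [] = rd.items.flatMap
      (fun rh => if rh.2.contains k then labelsFlat sd cs rh.1 else []) := by
    rw [hdA, A_outer_getD]
    simp [hk]
  obtain ⟨_, hBg⟩ := B_main sd (PySem.Set.ofList cs) rd.items k hr0
  rw [← hdB] at hBg
  have h0g : hr0.getD k [] = [] := B0_getD _ _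
  have hcontk : hr0.contains k = true := by
    rw [PySem.Dict.contains_eq_decide_mem_keys, h0keys]
    simpa using hk
  have hB : dB.getD k [] = rd.items.flatMap
      (fun rh => if rh.2.contains k then [labelsFlat sd cs rh.1] else []) := by
    rw [hBg, h0g, List.nil_append]
    apply List.flatMap_congr
    intro rh _
    have hcond : (((PySem.List.dedup rh.2).filter (fun h => hr0.contains h)).contains k)
        = rh.2.contains k := by
      by_cases hm : k ∈ rh.2
      · simp [List.mem_filter, hm, hcontk]
      · simp [List.mem_filter, hm]
    rw [hcond, labelsB_eq]
  simp only [Function.comp_apply]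
  rw [hA, hB, flatten_flatMap_if]
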